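-- pv_equiv track=rewrite | github.com/BigBIueWhale/deep_intent_search | yellow_marker.py | split_text_evenly
-- ===== SOURCE A (Python) =====
-- from typing import Iterable, List, Optional, Tuple, TypedDict
--
-- def split_text_evenly(text: str, num_parts: int) -> List[str]:
--     if num_parts <= 1:
--         return [text]
--     approx_char = len(text) // num_parts
--     parts: List[str] = []
--     start = 0
--     for _ in range(num_parts - 1):
--         end = start + approx_char
--         # Find the nearest newline after the approx end, to avoid splitting mid-line
--         newline_pos = text.find('\n', end)
--         if newline_pos == -1:
--             newline_pos = len(text)  # If no more newlines, take the rest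
--         else:
--             newline_pos += 1  # Include the newline in the current part
--         parts.append(text[start:newline_pos])
--         start = newline_pos
--     parts.append(text[start:])
--     return parts
-- ===== SOURCE B (Python) =====
-- from typing import List
--
-- def split_text_evenly(text: str, num_parts: int) -> List[str]:
--     if num_parts <= 1:
--         return [text]
--     # Stage 1: decompose the text once into whole lines (each keeping its '\n').
--     lines: List[str] = []
--     buf: List[str] = []
--     for c in text:
--         buf.append(c)
--         if c == '\n':
--             lines.append(''.join(buf))
--             buf = []
--     if buf:
--         lines.append(''.join(buf))
--     # Stage 2: greedily group whole lines into parts; a part is closed at the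
--     # first line whose terminating newline lies at or past the even target.
--     approx_char = len(text) // num_parts
--     parts: List[str] = []
--     i = 0
--     cum = 0
--     for _ in range(num_parts - 1):
--         target = cum + approx_char
--         chunk: List[str] = []
--         while i < len(lines):
--             ln = lines[i]
--             chunk.append(ln)
--             cum += len(ln)
--             i += 1
--             if ln.endswith('\n') and cum - 1 >= target:
--                 break
--         parts.append(''.join(chunk))
--     parts.append(''.join(lines[i:]))
--     return parts
-- ===== Notes on version B (the rewrite author's own statement) =====
-- stated objective: alternative
-- what changed: B first decomposes the text once into a list of whole newline-terminated lines and then greedily groups whole lines into parts by cumulative length, instead of A's repeated character-index text.find scans and slicing; parts are rebuilt by joining grouped lines.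
import Mathlib
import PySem

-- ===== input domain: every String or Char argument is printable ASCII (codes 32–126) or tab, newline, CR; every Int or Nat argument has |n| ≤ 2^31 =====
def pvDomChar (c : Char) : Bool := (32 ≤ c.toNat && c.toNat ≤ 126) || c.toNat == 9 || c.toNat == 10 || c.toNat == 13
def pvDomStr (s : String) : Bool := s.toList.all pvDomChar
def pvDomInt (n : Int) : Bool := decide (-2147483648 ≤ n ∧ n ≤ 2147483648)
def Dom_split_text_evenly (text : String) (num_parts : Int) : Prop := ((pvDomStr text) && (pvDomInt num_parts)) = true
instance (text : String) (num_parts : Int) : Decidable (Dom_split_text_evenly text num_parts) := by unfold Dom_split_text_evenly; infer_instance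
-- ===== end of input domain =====

-- B decomposes the text once into whole '\n'-terminated lines and then greedily
-- groups those lines into parts by cumulative length (objective: alternative, same cost).

-- ===== PORT A =====
-- loop body of A's 'for _ in range(num_parts - 1)'
def pvStepA (text : String) (approx : Int) (acc : List String × Int) : List String × Int :=
  let start := acc.2
  let e := start + approx
  let p0 := PySem.Str.findFrom text "\n" e none
  let np := if p0 = -1 then PySem.Str.len text else p0 + 1
  (acc.1 ++ [PySem.Str.slice text (some start) (some np)], np)

def split_text_evenly (text : String) (num_parts : Int) : List String :=
  if num_parts ≤ 1 then [text]
  else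
    let approx := PySem.Int.floordiv (PySem.Str.len text) num_parts
    let st := (PySem.List.pyRange 0 (num_parts - 1) 1).foldl
      (fun acc _ => pvStepA text approx acc) ([], 0)
    st.1 ++ [PySem.Str.slice text (some st.2) none]

-- ===== PORT B =====
-- body of Source B's stage-1 loop 'for c in text: buf.append(c); if c == '\n': …'
-- (a Python line string is its List Char on the list side; ''.join(buf) closes buf into a line)
def pvBufStep (acc : List (List Char) × List Char) (c : Char) : List (List Char) × List Char :=
  let buf := acc.2 ++ [c]
  if c = '\n' then (acc.1 ++ [buf], []) else (acc.1, buf)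

-- Source B's stage 1: the list of whole lines, each keeping its '\n' ('if buf: lines.append(…)')
def pvLines (s : List Char) : List (List Char) :=
  let st := s.foldl pvBufStep ([], [])
  if st.2 = [] then st.1 else st.1 ++ [st.2]

-- Source B's inner 'while i < len(lines): … if ln.endswith('\n') and cum - 1 >= target: break'
def pvConsume (lines : List (List Char)) (target : Int) (i : Nat) (cum : Int)
    (chunk : List (List Char)) : List (List Char) × Nat × Int :=
  if h : i < lines.length then
    let ln := lines[i]
    let chunk' := chunk ++ [ln]
    let cum' := cum + (ln.length : Int)
    if PySem.Chars.endswith ln ['\n'] && decide (target ≤ cum' - 1) then (chunk', i + 1, cum')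
    else pvConsume lines target (i + 1) cum' chunk'
  else (chunk, i, cum)
termination_by lines.length - i

-- body of Source B's outer 'for _ in range(num_parts - 1)'; state = (parts, i, cum)
def pvStepB (lines : List (List Char)) (approx : Int)
    (acc : List String × Nat × Int) : List String × Nat × Int :=
  let target := acc.2.2 + approx
  let r := pvConsume lines target acc.2.1 acc.2.2 []
  (acc.1 ++ [String.ofList (PySem.Chars.join [] r.1)], r.2.1, r.2.2)

def split_text_evenly_alt (text : String) (num_parts : Int) : List String :=
  if num_parts ≤ 1 then [text]
  else
    let lines := pvLines text.toList
    let approx := PySem.Int.floordiv (PySem.Str.len text) num_parts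
    let st := (PySem.List.pyRange 0 (num_parts - 1) 1).foldl
      (fun acc _ => pvStepB lines approx acc) ([], 0, 0)
    -- lines[i:] with i : Nat is lines.drop i (exact: i ≥ 0)
    st.1 ++ [String.ofList (PySem.Chars.join [] (lines.drop st.2.1))]

-- ===== PRECONDITION & SPEC =====
def Spec_split_text_evenly (text : String) (num_parts : Int) (out : List String) : Prop := out = split_text_evenly_alt text num_parts
instance (text : String) (num_parts : Int) (out : List String) : Decidable (Spec_split_text_evenly text num_parts out) := by unfold Spec_split_text_evenly; infer_instance

-- ===== CLAIM (what is proved, stated in full; the proofs are below) =====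
def Claim_equal_split_text_evenly : Prop := ∀ (text : String) (num_parts : Int), Dom_split_text_evenly text num_parts → Spec_split_text_evenly text num_parts (split_text_evenly text num_parts)

-- ===== LEMMAS AND PROOFS =====

-- A's newline cut position for a given search start
def pvCut (s : List Char) (target : Int) : Int :=
  let p := PySem.Chars.findFrom s ['\n'] target none
  if p = -1 then (s.length : Int) else p + 1

lemma pvJoinNil (l : List (List Char)) : PySem.Chars.join [] l = l.flatten := by
  induction l with
  | nil => simp [PySem.Chars.join_nil]
  | cons x t ih =>
    cases t with
    | nil => simp [PySem.Chars.join_singleton]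
    | cons y r => rw [PySem.Chars.join_cons_cons]; simp_all

lemma singleton_prefix_iff (a : Char) (l : List Char) : [a] <+: l ↔ l.head? = some a := by
  cases l with
  | nil => simp
  | cons x t => simp [List.cons_prefix_cons, eq_comm]

-- structural facts about Source B's line list
def pvLinesOK (lines : List (List Char)) : Prop :=
  ∀ k (hk : k < lines.length),
    '\n' ∉ (lines[k]).dropLast ∧ lines[k] ≠ [] ∧
    (PySem.Chars.endswith lines[k] ['\n'] = false → k + 1 = lines.length ∧ '\n' ∉ lines[k])

def pvGoodSt (ls : List (List Char)) (buf : List Char) : Prop :=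
  (∀ l ∈ ls, ∃ t, l = t ++ ['\n'] ∧ '\n' ∉ t) ∧ '\n' ∉ buf

lemma pvFoldGood (s : List Char) : ∀ (ls : List (List Char)) (buf : List Char), pvGoodSt ls buf →
    pvGoodSt (s.foldl pvBufStep (ls, buf)).1 (s.foldl pvBufStep (ls, buf)).2 ∧
    (s.foldl pvBufStep (ls, buf)).1.flatten ++ (s.foldl pvBufStep (ls, buf)).2 = ls.flatten ++ buf ++ s := by
  induction s with
  | nil => intro ls buf h; simpa using h
  | cons c t ih =>
    intro ls buf h
    simp only [List.foldl_cons]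
    by_cases hc : c = '\n'
    · have hstep : pvBufStep (ls, buf) c = (ls ++ [buf ++ [c]], []) := by
        simp [pvBufStep, hc]
      rw [hstep]
      obtain ⟨ih1, ih2⟩ := ih (ls ++ [buf ++ [c]]) []
        ⟨by
          intro l hl
          rcases List.mem_append.mp hl with hl | hl
          · exact h.1 l hl
          · refine ⟨buf, by simpa [hc] using List.mem_singleton.mp hl, h.2⟩,
          by simp⟩
      exact ⟨ih1, by simpa using ih2⟩
    · have hstep : pvBufStep (ls, buf) c = (ls, buf ++ [c]) := by
        simp [pvBufStep, hc]
      rw [hstep]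
      obtain ⟨ih1, ih2⟩ := ih ls (buf ++ [c])
        ⟨h.1, by
          intro hm
          rcases List.mem_append.mp hm with hm | hm
          · exact h.2 hm
          · exact hc (List.mem_singleton.mp hm).symm⟩
      exact ⟨ih1, by simpa using ih2⟩

lemma pvLines_flatten (s : List Char) : (pvLines s).flatten = s := by
  obtain ⟨_, h2⟩ := pvFoldGood s [] [] ⟨by simp, by simp⟩
  unfold pvLines
  by_cases he : (s.foldl pvBufStep ([], [])).2 = []
  · simp only [he, if_true]
    simpa [he] using h2
  · simp only [he, if_false]
    simpa using h2

lemma pvLines_ok (s : List Char) : pvLinesOK (pvLines s) := by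
  obtain ⟨⟨hg, hb⟩, _⟩ := pvFoldGood s [] [] ⟨by simp, by simp⟩
  set st := s.foldl pvBufStep ([], []) with hst
  have hpl : pvLines s = if st.2 = [] then st.1 else st.1 ++ [st.2] := rfl
  unfold pvLinesOK
  rw [hpl]
  by_cases he : st.2 = []
  · simp only [he, if_true]
    intro k hk
    rcases hg _ (List.getElem_mem hk) with ⟨t, ht, hnt⟩
    refine ⟨by simpa [ht] using hnt, by simp [ht], ?_⟩
    intro hef
    exfalso
    have : PySem.Chars.endswith st.1[k] ['\n'] = true := by
      rw [PySem.Chars.endswith_iff, ht]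
      exact ⟨t, rfl⟩
    simp [this] at hef
  · simp only [he, if_false]
    intro k hk
    have hklen : k < st.1.length + 1 := by simpa using hk
    by_cases hk1 : k < st.1.length
    · have hgetl : (st.1 ++ [st.2])[k] = st.1[k] := List.getElem_append_left hk1
      rw [hgetl]
      rcases hg _ (List.getElem_mem hk1) with ⟨t, ht, hnt⟩
      refine ⟨by simpa [ht] using hnt, by simp [ht], ?_⟩
      intro hef
      exfalso
      have : PySem.Chars.endswith st.1[k] ['\n'] = true := by
        rw [PySem.Chars.endswith_iff, ht]
        exact ⟨t, rfl⟩
      simp [this] at hef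
    · have hke : k = st.1.length := by omega
      have hgetl : (st.1 ++ [st.2])[k] = st.2 := by
        subst hke; simp
      rw [hgetl]
      refine ⟨fun hm => hb (List.dropLast_sublist _ |>.mem hm), he, fun _ => ⟨?_, hb⟩⟩
      simp only [List.length_append, List.length_cons, List.length_nil]
      omega

-- cumulative end position of the first k lines
def pvEnd (lines : List (List Char)) (k : Nat) : Nat := ((lines.take k).flatten).length

lemma pvEnd_succ (lines : List (List Char)) (k : Nat) (hk : k < lines.length) :
    pvEnd lines (k + 1) = pvEnd lines k + (lines[k]).length := by
  have h : lines.take (k + 1) = lines.take k ++ [lines[k]] := by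
    rw [List.take_add_one, List.getElem?_eq_getElem hk]; rfl
  unfold pvEnd
  rw [h, List.flatten_append]
  simp

lemma pvDrop_eq (s : List Char) (lines : List (List Char)) (hfl : lines.flatten = s)
    (i : Nat) : s.drop (pvEnd lines i) = (lines.drop i).flatten := by
  have : s = (lines.take i).flatten ++ (lines.drop i).flatten := by
    rw [← List.flatten_append, List.take_append_drop, hfl]
  rw [this]
  unfold pvEnd
  rw [List.drop_left]

lemma pvEnd_le (s : List Char) (lines : List (List Char)) (hfl : lines.flatten = s)
    (i : Nat) : pvEnd lines i ≤ s.length := by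
  have h : s.length = pvEnd lines i + ((lines.drop i).flatten).length := by
    conv_lhs => rw [← hfl, ← List.take_append_drop i lines]
    rw [List.flatten_append, List.length_append]
    rfl
  omega

-- global character at offset j inside line i
lemma pvIdx (s : List Char) (lines : List (List Char)) (hfl : lines.flatten = s)
    (i : Nat) (hi : i < lines.length) (j : Nat) (hj : j < (lines[i]).length)
    (hlt : pvEnd lines i + j < s.length) :
    s[pvEnd lines i + j] = (lines[i])[j] := by
  have hdrop := pvDrop_eq s lines hfl i
  have hdl : lines.drop i = lines[i] :: lines.drop (i + 1) := List.drop_eq_getElem_cons hi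
  have h1 : s[pvEnd lines i + j] = (s.drop (pvEnd lines i))[j]'(by
      simp only [List.length_drop]; omega) := by
    rw [List.getElem_drop]
  rw [h1]
  have h2 : s.drop (pvEnd lines i) = lines[i] ++ (lines.drop (i + 1)).flatten := by
    rw [hdrop, hdl, List.flatten_cons]
  simp only [h2]
  exact List.getElem_append_left hj

-- characterisations of A's cut
lemma pvCut_found (s : List Char) (target : Int) (h0 : 0 ≤ target) (p : Nat)
    (hp : p < s.length) (hnl : s[p] = '\n') (htp : target ≤ (p : Int))
    (hmin : ∀ q (hq : q < p), target ≤ (q : Int) → s[q]'(lt_trans hq hp) ≠ '\n') :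
    pvCut s target = (p : Int) + 1 := by
  have hkle : target.toNat ≤ s.length := by omega
  have htc : (target.toNat : Int) = target := by omega
  have hfne : PySem.Chars.findFrom s ['\n'] target none ≠ -1 := by
    intro hc
    rw [← htc, PySem.Chars.findFrom_natCast_eq_neg_one_iff s ['\n'] target.toNat hkle] at hc
    exact hc ((List.singleton_infix_iff _ _).mpr (by
      have : s[p] ∈ s.drop target.toNat := by
        rw [List.mem_drop_iff_getElem]
        exact ⟨p - target.toNat, by omega, by congr 1; omega⟩
      simpa [hnl] using this))
  obtain ⟨b1, b2, b3⟩ := PySem.Chars.findFrom_natCast_spec s ['\n'] target.toNat hkle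
    (by rw [htc]; exact hfne)
  rw [htc] at b1 b2 b3
  set f := PySem.Chars.findFrom s ['\n'] target none with hf
  have hfp : f.toNat ≤ p := by
    by_contra hcon
    rw [not_le] at hcon
    exact b3 p (by omega) hcon ((singleton_prefix_iff _ _).mpr (by
      rw [List.head?_drop]
      simp [hnl, hp]))
  have hfl : f.toNat < s.length ∧ s[f.toNat]? = some '\n' := by
    rcases (singleton_prefix_iff _ _).mp b2 with h2
    rw [List.head?_drop] at h2
    have : f.toNat < s.length := by
      by_contra hc
      rw [not_lt] at hc
      simp [List.getElem?_eq_none hc] at h2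
    exact ⟨this, h2⟩
  have hpf : p ≤ f.toNat := by
    by_contra hcon
    rw [not_le] at hcon
    have hval : s[f.toNat]'hfl.1 = '\n' := by
      have := hfl.2
      rwa [List.getElem?_eq_getElem hfl.1, Option.some_inj] at this
    exact hmin f.toNat hcon (by omega) hval
  have : f = (p : Int) := by omega
  unfold pvCut
  rw [← hf, if_neg hfne, this]

lemma pvCut_none (s : List Char) (target : Int) (h0 : 0 ≤ target)
    (hnone : ∀ q (hq : q < s.length), target ≤ (q : Int) → s[q] ≠ '\n') :
    pvCut s target = (s.length : Int) := by
  have hfeq : PySem.Chars.findFrom s ['\n'] target none = -1 := by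
    by_cases hts : target ≤ (s.length : Int)
    · have htc : (target.toNat : Int) = target := by omega
      rw [← htc, PySem.Chars.findFrom_natCast_eq_neg_one_iff s ['\n'] target.toNat (by omega)]
      intro hcon
      rcases (List.singleton_infix_iff _ _).mp hcon with hmem
      rcases List.mem_drop_iff_getElem.mp hmem with ⟨i, hi, hie⟩
      exact hnone (target.toNat + i) (by omega) (by omega) hie
    · simp only [PySem.Chars.findFrom]
      have hn0 : ¬ target < 0 := by omega
      have hlen : (s.length : Int) < target := by omega
      simp [hn0, hlen]
  unfold pvCut
  rw [hfeq, if_pos rfl]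

-- the consume loop reaches exactly A's cut
lemma pvConsume_spec (s : List Char) (lines : List (List Char))
    (hfl : lines.flatten = s) (hok : pvLinesOK lines) (target : Int) :
    ∀ (i : Nat), i ≤ lines.length → ∀ (chunk : List (List Char)),
    ((pvEnd lines i : Int) ≤ target) →
    ∃ i', i ≤ i' ∧ i' ≤ lines.length ∧
      pvConsume lines target i ((pvEnd lines i : Int)) chunk
        = (chunk ++ (lines.drop i).take (i' - i), i', ((pvEnd lines i' : Int))) ∧
      ((pvEnd lines i' : Int)) = pvCut s target := by
  intro i hi
  induction hn : lines.length - i generalizing i with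
  | zero =>
    intro chunk htc
    have hie : i = lines.length := by omega
    rw [pvConsume]
    have h : ¬ i < lines.length := by omega
    simp only [h, dite_false]
    refine ⟨i, le_refl _, hi, by simp, ?_⟩
    have hE : pvEnd lines i = s.length := by
      subst hie
      unfold pvEnd
      simp [hfl]
    rw [hE] at htc ⊢
    rw [pvCut_none s target (by omega) (fun q hq hqt => by omega)]
  | succ n ih =>
    intro chunk htc
    have h : i < lines.length := by omega
    rw [pvConsume]
    simp only [h, dite_true]
    obtain ⟨hdl, hne, hlast⟩ := hok i h
    set ln := lines[i] with hln
    have hEsucc : pvEnd lines (i + 1) = pvEnd lines i + ln.length := pvEnd_succ lines i h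
    have hE1le : pvEnd lines (i + 1) ≤ s.length := pvEnd_le s lines hfl (i + 1)
    have hdropTake1 : (lines.drop i).take 1 = [ln] := by
      rw [List.drop_eq_getElem_cons h]
      simp [← hln]
    by_cases hew : PySem.Chars.endswith ln ['\n'] = true
    · rcases (PySem.Chars.endswith_iff ln ['\n']).mp hew with ⟨t, ht⟩
      have hlnt : ln = t ++ ['\n'] := ht.symm
      have hlen : ln.length = t.length + 1 := by simp [hlnt]
      have hlen' : (lines[i]'h).length = t.length + 1 := by rw [← hln]; exact hlen
      by_cases hbr : target ≤ (pvEnd lines i : Int) + (ln.length : Int) - 1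
      · -- break: the newline ending this line is the first at/after target
        simp only [hew, hbr, decide_true, Bool.true_and, if_true]
        refine ⟨i + 1, by omega, by omega, ?_, ?_⟩
        · have h11 : i + 1 - i = 1 := by omega
          have h3 : (pvEnd lines i : Int) + (ln.length : Int) = ((pvEnd lines (i + 1) : Nat) : Int) := by
            rw [hEsucc]; push_cast; ring
          rw [h11, hdropTake1, h3]
        · have hplt : pvEnd lines i + t.length < s.length := by omega
          have hnt : '\n' ∉ t := by
            have hdt : ln.dropLast = t := by simp [hlnt]
            rwa [hdt] at hdl
          have hl2 : lines[i]'h = t ++ ['\n'] := by rw [← hln]; exact hlnt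
          have hsp : s[pvEnd lines i + t.length]'hplt = '\n' := by
            rw [pvIdx s lines hfl i h t.length (by omega) hplt]
            simp only [hl2]
            simp
          have hcut := pvCut_found s target (by omega) (pvEnd lines i + t.length) hplt hsp
            (by omega)
            (by
              intro q hq hqt
              have hq1 : pvEnd lines i ≤ q := by omega
              have hj : q - pvEnd lines i < t.length := by omega
              have hq2 : q < s.length := lt_trans hq hplt
              have hidx : s[q]'hq2 = (lines[i]'h)[q - pvEnd lines i]'(by omega) := by
                have h6 := pvIdx s lines hfl i h (q - pvEnd lines i) (by omega)
                  (by omega)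
                rw [← h6]
                congr 1
                omega
              rw [hidx]
              have hget : (lines[i]'h)[q - pvEnd lines i]'(by omega) = t[q - pvEnd lines i]'hj := by
                simp only [hl2]
                exact List.getElem_append_left hj
              rw [hget]
              exact fun hc => hnt (hc ▸ List.getElem_mem hj))
          rw [hcut, hEsucc]
          push_cast
          omega
      · -- keep consuming: this line's newline is before target
        simp only [hew, hbr, decide_false, Bool.and_false]
        have htc' : ((pvEnd lines (i + 1) : Int)) ≤ target := by
          rw [hEsucc]; push_cast at hbr ⊢; omega
        obtain ⟨i', hi1, hi2, hres, hcut⟩ := ih (i + 1) (by omega) (by omega) (chunk ++ [ln]) htc'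
        refine ⟨i', by omega, hi2, ?_, hcut⟩
        have hcc : (pvEnd lines i : Int) + (ln.length : Int) = ((pvEnd lines (i + 1) : Int)) := by
          rw [hEsucc]; push_cast; ring
        rw [hcc, hres]
        rw [List.append_assoc]
        rw [List.drop_eq_getElem_cons h, ← hln]
        have : i' - i = (i' - (i + 1)) + 1 := by omega
        rw [this, List.take_succ_cons]
        simp
    · -- line without trailing newline: it is the last line; the loop drains it and stops
      have hefalse : PySem.Chars.endswith ln ['\n'] = false := by
        simpa using hew
      obtain ⟨hilast, hnoNl⟩ := hlast hefalse
      simp only [hefalse, Bool.false_and]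
      rw [pvConsume]
      have h2 : ¬ i + 1 < lines.length := by omega
      simp only [h2, dite_false]
      refine ⟨i + 1, by omega, by omega, ?_, ?_⟩
      · have h11 : i + 1 - i = 1 := by omega
        have h3 : (pvEnd lines i : Int) + (ln.length : Int) = ((pvEnd lines (i + 1) : Nat) : Int) := by
          rw [hEsucc]; push_cast; ring
        rw [h11, hdropTake1, h3]
        simp
      · have hEfull : pvEnd lines (i + 1) = s.length := by
          have : lines.take (i + 1) = lines := List.take_of_length_le (by omega)
          unfold pvEnd
          rw [this, hfl]
        rw [hEfull]
        have hEsucc' : pvEnd lines (i + 1) = pvEnd lines i + (lines[i]'h).length := by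
          rw [← hln]; exact hEsucc
        have hcut := pvCut_none s target (by omega)
          (by
            intro q hq hqt
            have hq1 : pvEnd lines i ≤ q := by omega
            have hqE : q < pvEnd lines (i + 1) := by omega
            have hj : q - pvEnd lines i < (lines[i]'h).length := by omega
            have hnoNl' : '\n' ∉ lines[i]'h := by rw [← hln]; exact hnoNl
            have hidx : s[q]'hq = (lines[i]'h)[q - pvEnd lines i]'hj := by
              have h6 := pvIdx s lines hfl i h (q - pvEnd lines i) hj (by omega)
              rw [← h6]
              congr 1
              omega
            rw [hidx]
            exact fun hc => hnoNl' (hc ▸ List.getElem_mem hj))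
        rw [hcut]

-- the flattened consumed chunk is exactly A's slice
lemma pvSeg_eq (s : List Char) (lines : List (List Char)) (hfl : lines.flatten = s)
    {i i' : Nat} (h1 : i ≤ i') (_h2 : i' ≤ lines.length) :
    ((lines.drop i).take (i' - i)).flatten
      = (s.drop (pvEnd lines i)).take (pvEnd lines i' - pvEnd lines i) := by
  have hseg : lines.take i' = lines.take i ++ (lines.drop i).take (i' - i) := by
    conv_lhs => rw [← List.take_append_drop i (lines.take i')]
    congr 1
    · rw [List.take_take, Nat.min_eq_left h1]
    · rw [List.drop_take]
  have hlen2 : pvEnd lines i' = pvEnd lines i + ((lines.drop i).take (i' - i)).flatten.length := by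
    unfold pvEnd
    rw [hseg, List.flatten_append, List.length_append]
  have hs2 : s = (lines.take i).flatten
      ++ (((lines.drop i).take (i' - i)).flatten ++ (lines.drop i').flatten) := by
    rw [← List.flatten_append, ← List.flatten_append, ← List.append_assoc, ← hseg,
      List.take_append_drop, hfl]
  have htk : pvEnd lines i' - pvEnd lines i = ((lines.drop i).take (i' - i)).flatten.length := by
    omega
  rw [htk]
  conv_rhs => rw [hs2]
  show _ = (List.drop ((lines.take i).flatten).length _).take _
  rw [List.drop_left, List.take_left]

lemma pvLen_eq (text : String) : PySem.Str.len text = (text.toList.length : Int) := by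
  simp

-- one outer iteration of A and of B agree
lemma pvStep_eq (text : String) (lines : List (List Char))
    (hfl : lines.flatten = text.toList) (hok : pvLinesOK lines)
    (approx : Int) (hap : 0 ≤ approx) (parts : List String) (i : Nat) (hi : i ≤ lines.length) :
    ∃ i', i' ≤ lines.length ∧
      pvStepB lines approx (parts, i, ((pvEnd lines i : Nat) : Int))
        = ((pvStepA text approx (parts, ((pvEnd lines i : Nat) : Int))).1, i',
            ((pvEnd lines i' : Nat) : Int)) ∧
      (pvStepA text approx (parts, ((pvEnd lines i : Nat) : Int))).2
        = ((pvEnd lines i' : Nat) : Int) := by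
  set s := text.toList with hs
  set target := ((pvEnd lines i : Nat) : Int) + approx with htg
  obtain ⟨i', hi1, hi2, hres, hcut⟩ :=
    pvConsume_spec s lines hfl hok target i hi [] (by omega)
  have hnp : (if PySem.Str.findFrom text "\n" target none = -1 then PySem.Str.len text
      else PySem.Str.findFrom text "\n" target none + 1) = pvCut s target := by
    unfold pvCut
    rw [PySem.Str.findFrom_eq, pvLen_eq]
    rfl
  have hslice : PySem.Str.slice text (some ((pvEnd lines i : Nat) : Int))
      (some ((pvEnd lines i' : Nat) : Int))
      = String.ofList (PySem.Chars.join [] ((lines.drop i).take (i' - i))) := by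
    rw [pvJoinNil, pvSeg_eq s lines hfl hi1 hi2]
    rw [← String.ofList_toList (s := PySem.Str.slice text _ _)]
    congr 1
    rw [PySem.Str.toList_slice]
    simp [pysem]
    rw [← hs]
  refine ⟨i', hi2, ?_, ?_⟩
  · show (parts ++ [String.ofList (PySem.Chars.join []
        (pvConsume lines target i ((pvEnd lines i : Nat) : Int) []).1)],
      (pvConsume lines target i ((pvEnd lines i : Nat) : Int) []).2.1,
      (pvConsume lines target i ((pvEnd lines i : Nat) : Int) []).2.2) = _
    rw [hres]
    have hA : (pvStepA text approx (parts, ((pvEnd lines i : Nat) : Int))).1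
        = parts ++ [PySem.Str.slice text (some ((pvEnd lines i : Nat) : Int))
            (some (if PySem.Str.findFrom text "\n" target none = -1 then PySem.Str.len text
              else PySem.Str.findFrom text "\n" target none + 1))] := rfl
    rw [hA, hnp, hcut.symm]
    rw [hslice]
    simp
  · show (if PySem.Str.findFrom text "\n" target none = -1 then PySem.Str.len text
      else PySem.Str.findFrom text "\n" target none + 1) = _
    rw [hnp, ← hcut]

-- the two outer loops agree step by step
lemma pvLoop_eq (text : String) (lines : List (List Char))
    (hfl : lines.flatten = text.toList) (hok : pvLinesOK lines)
    (approx : Int) (hap : 0 ≤ approx) (l : List Int) :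
    ∀ (parts : List String) (i : Nat), i ≤ lines.length →
    ∃ i', i' ≤ lines.length ∧
      l.foldl (fun acc _ => pvStepB lines approx acc) (parts, i, ((pvEnd lines i : Nat) : Int))
        = ((l.foldl (fun acc _ => pvStepA text approx acc)
              (parts, ((pvEnd lines i : Nat) : Int))).1, i', ((pvEnd lines i' : Nat) : Int)) ∧
      (l.foldl (fun acc _ => pvStepA text approx acc)
          (parts, ((pvEnd lines i : Nat) : Int))).2 = ((pvEnd lines i' : Nat) : Int) := by
  induction l with
  | nil =>
    intro parts i hi
    exact ⟨i, hi, rfl, rfl⟩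
  | cons x t ih =>
    intro parts i hi
    simp only [List.foldl_cons]
    obtain ⟨i1, hi1le, hstep, hcum⟩ := pvStep_eq text lines hfl hok approx hap parts i hi
    rw [hstep]
    have hA : pvStepA text approx (parts, ((pvEnd lines i : Nat) : Int))
        = ((pvStepA text approx (parts, ((pvEnd lines i : Nat) : Int))).1,
           (pvStepA text approx (parts, ((pvEnd lines i : Nat) : Int))).2) := rfl
    obtain ⟨i', h1, h2, h3⟩ :=
      ih (pvStepA text approx (parts, ((pvEnd lines i : Nat) : Int))).1 i1 hi1le
    refine ⟨i', h1, ?_, ?_⟩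
    · rw [h2]
      conv_rhs => rw [hA, hcum]
    · conv_lhs => rw [hA, hcum]
      exact h3

-- ===== VERDICT (by name: the statement is the Claim_ definition above) =====
theorem split_text_evenly_spec : Claim_equal_split_text_evenly := by
  intro text num_parts _
  unfold Spec_split_text_evenly split_text_evenly split_text_evenly_alt
  by_cases h1 : num_parts ≤ 1
  · simp [h1]
  · simp only [h1, if_false]
    have hpos : 0 < num_parts := by omega
    have hap : 0 ≤ PySem.Int.floordiv (PySem.Str.len text) num_parts := by
      rw [PySem.Int.floordiv_eq_ediv_of_pos hpos]
      exact Int.ediv_nonneg (by rw [pvLen_eq]; positivity) (le_of_lt hpos)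
    have hfl := pvLines_flatten text.toList
    have hok := pvLines_ok text.toList
    have hz : ((pvEnd (pvLines text.toList) 0 : Nat) : Int) = 0 := by
      simp [pvEnd]
    obtain ⟨i', hile, hfold, hcum⟩ := pvLoop_eq text (pvLines text.toList) hfl hok
      (PySem.Int.floordiv (PySem.Str.len text) num_parts) hap
      (PySem.List.pyRange 0 (num_parts - 1) 1) [] 0 (Nat.zero_le _)
    rw [hz] at hfold hcum
    rw [hfold]
    have hA : (PySem.List.pyRange 0 (num_parts - 1) 1).foldl
        (fun acc _ => pvStepA text (PySem.Int.floordiv (PySem.Str.len text) num_parts) acc) ([], 0)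
        = (((PySem.List.pyRange 0 (num_parts - 1) 1).foldl
            (fun acc _ => pvStepA text (PySem.Int.floordiv (PySem.Str.len text) num_parts) acc)
            ([], 0)).1,
           ((PySem.List.pyRange 0 (num_parts - 1) 1).foldl
            (fun acc _ => pvStepA text (PySem.Int.floordiv (PySem.Str.len text) num_parts) acc)
            ([], 0)).2) := rfl
    conv_lhs => rw [hA, hcum]
    congr 1
    have htail : PySem.Str.slice text (some ((pvEnd (pvLines text.toList) i' : Nat) : Int)) none
        = String.ofList (PySem.Chars.join [] ((pvLines text.toList).drop i')) := by
      rw [pvJoinNil, ← pvDrop_eq text.toList (pvLines text.toList) hfl i']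
      rw [← String.ofList_toList (s := PySem.Str.slice text _ _)]
      congr 1
      rw [PySem.Str.toList_slice]
      simp [pysem]
    rw [htail]
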